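-- pv_equiv track=rewrite | github.com/daswitez/Aurellis-fastApi | app/scraper/engine.py | _select_key_internal_links
-- ===== SOURCE A (Python) =====
-- MAX_KEY_PAGES_TO_CRAWL = 5
--
-- KEY_PAGE_PRIORITY = {
--     "contact": 0,
--     "locations": 1,
--     "pricing": 2,
--     "booking": 3,
--     "services": 4,
--     "about": 5,
--     "careers": 6,
--     "other": 7,
-- }
--
-- def _classify_page_type(url: str) -> str:
--     lowered = url.lower()
--     if "contact" in lowered or "contacto" in lowered:
--         return "contact"
--     if "location" in lowered or "ubicacion" in lowered or "locations" in lowered or "sede" in lowered: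
--         return "locations"
--     if "pricing" in lowered or "precio" in lowered or "precios" in lowered or "cotiza" in lowered:
--         return "pricing"
--     if "book" in lowered or "booking" in lowered or "reserv" in lowered or "agenda" in lowered or "cita" in lowered:
--         return "booking"
--     if "service" in lowered or "servicio" in lowered:
--         return "services"
--     if "about" in lowered or "nosotros" in lowered or "equipo" in lowered:
--         return "about"
--     if "career" in lowered or "trabajo" in lowered or "empleo" in lowered:
--         return "careers"
--     return "other"
--
-- def _select_key_internal_links(internal_links: list[str], max_pages: int = MAX_KEY_PAGES_TO_CRAWL) -> list[dict[str, str]]: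
--     unique_links: list[str] = []
--     for link in internal_links:
--         if link not in unique_links:
--             unique_links.append(link)
--
--     sorted_links = sorted(
--         unique_links,
--         key=lambda link: (KEY_PAGE_PRIORITY.get(_classify_page_type(link), 99), link),
--     )
--     return [{"url": link, "page_type": _classify_page_type(link)} for link in sorted_links[:max_pages]]
-- ===== SOURCE B (Python) =====
-- MAX_KEY_PAGES_TO_CRAWL = 5
--
-- # classification as data: ordered (type name, keywords) table instead of an if-chain
-- _KEYWORD_TABLE = [
--     ("contact", ("contact", "contacto")),
--     ("locations", ("location", "ubicacion", "locations", "sede")),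
--     ("pricing", ("pricing", "precio", "precios", "cotiza")),
--     ("booking", ("book", "booking", "reserv", "agenda", "cita")),
--     ("services", ("service", "servicio")),
--     ("about", ("about", "nosotros", "equipo")),
--     ("careers", ("career", "trabajo", "empleo")),
-- ]
--
-- _TYPE_NAMES = [name for name, _ in _KEYWORD_TABLE] + ["other"]
--
-- def _rank(url):
--     lowered = url.lower()
--     idx = 0
--     for _, words in _KEYWORD_TABLE:
--         if any(w in lowered for w in words):
--             return idx
--         idx += 1
--     return idx
--
-- def _select_key_internal_links(internal_links, max_pages=MAX_KEY_PAGES_TO_CRAWL):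
--     buckets = [[] for _ in _TYPE_NAMES]
--     seen = set()
--     for link in internal_links:
--         if link not in seen:
--             seen.add(link)
--             buckets[_rank(link)].append(link)
--     ordered = []
--     for bucket in buckets:
--         ordered.extend(sorted(bucket))
--     return [{"url": link, "page_type": _TYPE_NAMES[_rank(link)]} for link in ordered[:max_pages]]
-- ===== Notes on version B (the rewrite author's own statement) =====
-- stated objective: faster
-- what changed: Replaces A's if-chain classifier, quadratic list-membership dedup and single global stable sort on the (priority, link) tuple key with a data-driven keyword table that ranks each link once, a set-based dedup that distributes links into eight priority buckets, and a concatenation of the buckets in rank order with each bucket sorted lexicographically.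
import Mathlib
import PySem

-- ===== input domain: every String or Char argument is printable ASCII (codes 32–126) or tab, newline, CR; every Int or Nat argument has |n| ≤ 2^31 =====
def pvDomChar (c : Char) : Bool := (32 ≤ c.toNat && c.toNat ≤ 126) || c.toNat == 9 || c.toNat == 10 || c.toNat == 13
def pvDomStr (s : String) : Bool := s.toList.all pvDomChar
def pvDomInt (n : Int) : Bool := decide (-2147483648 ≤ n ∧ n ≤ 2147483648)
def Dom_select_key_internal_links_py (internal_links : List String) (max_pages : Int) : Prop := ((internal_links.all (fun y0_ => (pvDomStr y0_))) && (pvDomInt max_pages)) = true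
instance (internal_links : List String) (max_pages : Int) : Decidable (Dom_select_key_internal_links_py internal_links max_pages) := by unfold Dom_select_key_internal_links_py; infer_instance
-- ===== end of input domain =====

-- B replaces A's if-chain classifier, quadratic list-dedup and global (priority, link)
-- tuple-key sort with a data-driven keyword table ranking each link once, a set-based
-- dedup into eight priority buckets, and concatenation of the per-bucket lexical sorts.

-- ===== PORT A =====
def keyPagePriority : PySem.Dict String Int :=
  PySem.Dict.ofList [("contact", 0), ("locations", 1), ("pricing", 2), ("booking", 3),
                     ("services", 4), ("about", 5), ("careers", 6), ("other", 7)]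

def classify_page_type (url : String) : String :=
  let lowered := PySem.Str.lower url
  if PySem.Str.isIn "contact" lowered || PySem.Str.isIn "contacto" lowered then "contact"
  else if PySem.Str.isIn "location" lowered || PySem.Str.isIn "ubicacion" lowered || PySem.Str.isIn "locations" lowered || PySem.Str.isIn "sede" lowered then "locations"
  else if PySem.Str.isIn "pricing" lowered || PySem.Str.isIn "precio" lowered || PySem.Str.isIn "precios" lowered || PySem.Str.isIn "cotiza" lowered then "pricing"
  else if PySem.Str.isIn "book" lowered || PySem.Str.isIn "booking" lowered || PySem.Str.isIn "reserv" lowered || PySem.Str.isIn "agenda" lowered || PySem.Str.isIn "cita" lowered then "booking"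
  else if PySem.Str.isIn "service" lowered || PySem.Str.isIn "servicio" lowered then "services"
  else if PySem.Str.isIn "about" lowered || PySem.Str.isIn "nosotros" lowered || PySem.Str.isIn "equipo" lowered then "about"
  else if PySem.Str.isIn "career" lowered || PySem.Str.isIn "trabajo" lowered || PySem.Str.isIn "empleo" lowered then "careers"
  else "other"

def select_key_internal_links_py (internal_links : List String) (max_pages : Int) : List (List (String × String)) :=
  let unique_links := internal_links.foldl (fun acc link => if link ∈ acc then acc else acc ++ [link]) []
  let sorted_links := PySem.List.sorted2 unique_links
    (fun link => keyPagePriority.getD (classify_page_type link) 99) (fun link => link) false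
  (PySem.List.slice sorted_links none (some max_pages)).map
    (fun link => [("url", link), ("page_type", classify_page_type link)])

-- ===== PORT B =====
def kwTable : List (String × List String) :=
  [("contact", ["contact", "contacto"]),
   ("locations", ["location", "ubicacion", "locations", "sede"]),
   ("pricing", ["pricing", "precio", "precios", "cotiza"]),
   ("booking", ["book", "booking", "reserv", "agenda", "cita"]),
   ("services", ["service", "servicio"]),
   ("about", ["about", "nosotros", "equipo"]),
   ("careers", ["career", "trabajo", "empleo"])]

def typeNames : List String := kwTable.map Prod.fst ++ ["other"]

-- the 'for _, words in _KEYWORD_TABLE' loop with an idx counter and early return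
def rankAux (lowered : String) : List (String × List String) → Int → Int
  | [], idx => idx
  | (_, words) :: rest, idx =>
      if words.any (fun w => PySem.Str.isIn w lowered) then idx
      else rankAux lowered rest (idx + 1)

def rankB (url : String) : Int := rankAux (PySem.Str.lower url) kwTable 0

-- buckets[_rank(link)].append(link) / _TYPE_NAMES[_rank(link)]: exact via pySetD/pyGetD,
-- since 0 ≤ rankB url < 8 = len(buckets) = len(_TYPE_NAMES) the index is always in range.
def select_key_internal_links_py_alt (internal_links : List String) (max_pages : Int) : List (List (String × String)) :=
  let st := internal_links.foldl
    (fun (st : PySem.Set String × List (List String)) link =>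
      if PySem.Set.contains st.1 link then st
      else (PySem.Set.add st.1 link,
            PySem.List.pySetD st.2 (rankB link)
              (PySem.List.pyGetD st.2 (rankB link) [] ++ [link])))
    (PySem.Set.empty, typeNames.map (fun _ => ([] : List String)))
  let ordered := st.2.foldl (fun acc bucket => acc ++ PySem.List.sorted bucket (fun x => x) false) []
  (PySem.List.slice ordered none (some max_pages)).map
    (fun link => [("url", link), ("page_type", PySem.List.pyGetD typeNames (rankB link) "")])

-- ===== PRECONDITION & SPEC =====
def Spec_select_key_internal_links_py (internal_links : List String) (max_pages : Int) (out : List (List (String × String))) : Prop := out = select_key_internal_links_py_alt internal_links max_pages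
instance (internal_links : List String) (max_pages : Int) (out : List (List (String × String))) : Decidable (Spec_select_key_internal_links_py internal_links max_pages out) := by unfold Spec_select_key_internal_links_py; infer_instance

-- ===== CLAIM (what is proved, stated in full; the proofs are below) =====
def Claim_equal_select_key_internal_links_py : Prop := ∀ (internal_links : List String) (max_pages : Int), Dom_select_key_internal_links_py internal_links max_pages → Spec_select_key_internal_links_py internal_links max_pages (select_key_internal_links_py internal_links max_pages)

-- ===== LEMMAS AND PROOFS =====

-- the loop body of B's dedup/bucket fold, named for the proofs (definitionally the port's lambda)
def bStep : (PySem.Set String × List (List String)) → String → (PySem.Set String × List (List String)) :=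
  fun st link =>
    if PySem.Set.contains st.1 link then st
    else (PySem.Set.add st.1 link,
          PySem.List.pySetD st.2 (rankB link)
            (PySem.List.pyGetD st.2 (rankB link) [] ++ [link]))

-- proof-side combined sort key: a digit char for the rank followed by the link itself
def rcChar (r : Int) : Char :=
  if r ≤ 0 then '0' else if r = 1 then '1' else if r = 2 then '2' else if r = 3 then '3'
  else if r = 4 then '4' else if r = 5 then '5' else if r = 6 then '6' else '7'

def bKey (l : String) : String := String.ofList (rcChar (rankB l) :: l.toList)

lemma rank_bounds (url : String) : 0 ≤ rankB url ∧ rankB url < 8 := by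
  unfold rankB
  simp only [kwTable, rankAux, List.any_cons, List.any_nil, Bool.or_false]
  split_ifs <;> norm_num

lemma rank_eq (url : String) :
    keyPagePriority.getD (classify_page_type url) 99 = rankB url := by
  unfold classify_page_type rankB
  simp only [kwTable, rankAux, List.any_cons, List.any_nil, Bool.or_false, Bool.or_assoc]
  split_ifs <;> decide

lemma classify_eq (url : String) :
    classify_page_type url = PySem.List.pyGetD typeNames (rankB url) "" := by
  unfold classify_page_type rankB
  simp only [kwTable, rankAux, List.any_cons, List.any_nil, Bool.or_false, Bool.or_assoc]
  split_ifs <;> decide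

lemma rc_lt_iff {r s : Int} (hr0 : 0 ≤ r) (hr : r < 8) (hs0 : 0 ≤ s) (hs : s < 8) :
    rcChar r < rcChar s ↔ r < s := by
  interval_cases r <;> interval_cases s <;> decide

lemma rc_eq_iff {r s : Int} (hr0 : 0 ≤ r) (hr : r < 8) (hs0 : 0 ≤ s) (hs : s < 8) :
    rcChar r = rcChar s ↔ r = s := by
  interval_cases r <;> interval_cases s <;> decide

lemma dedupA : ∀ (xs : List String) (acc : PySem.Set String),
    xs.foldl (fun acc link => if link ∈ acc then acc else acc ++ [link]) acc = PySem.Set.update acc xs := by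
  intro xs
  induction xs with
  | nil => intro acc; rfl
  | cons x t ih =>
    intro acc
    rw [List.foldl_cons, PySem.Set.update_cons, ← ih (acc.add x)]
    by_cases h : x ∈ acc <;> simp [h]

lemma before_eq (a b : String) :
    (decide (rankB a < rankB b) || (!decide (rankB b < rankB a) && decide (a < b)))
      = decide (bKey a < bKey b) := by
  rw [← decide_not, ← Bool.decide_and, ← Bool.decide_or, decide_eq_decide]
  obtain ⟨ha0, ha⟩ := rank_bounds a
  obtain ⟨hb0, hb⟩ := rank_bounds b
  rw [show bKey a < bKey b ↔ _ from String.lt_iff_toList_lt,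
      show (bKey a).toList = rcChar (rankB a) :: a.toList from String.toList_ofList,
      show (bKey b).toList = rcChar (rankB b) :: b.toList from String.toList_ofList,
      List.cons_lt_cons_iff]
  rw [rc_lt_iff ha0 ha hb0 hb, rc_eq_iff ha0 ha hb0 hb, ← String.lt_iff_toList_lt]
  constructor
  · rintro (h | ⟨h1, h2⟩)
    · exact Or.inl h
    · rcases lt_trichotomy (rankB a) (rankB b) with h' | h' | h'
      · exact Or.inl h'
      · exact Or.inr ⟨h', h2⟩
      · exact absurd h' h1
  · rintro (h | ⟨h1, h2⟩)
    · exact Or.inl h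
    · exact Or.inr ⟨by omega, h2⟩

lemma sorted2_eq_sorted (xs : List String) :
    PySem.List.sorted2 xs (fun l => keyPagePriority.getD (classify_page_type l) 99) (fun l => l) false
      = PySem.List.sorted xs bKey false := by
  have hk : (fun l => keyPagePriority.getD (classify_page_type l) 99) = fun l => rankB l :=
    funext rank_eq
  rw [hk, PySem.List.sorted_eq_foldl_insertBy]
  show List.foldl (fun acc x => PySem.List.insertBy
    (fun a b => decide (rankB a < rankB b)
      || (!decide (rankB b < rankB a) && decide (a < b))) x acc) [] xs = _
  have hb : (fun (a b : String) => decide (rankB a < rankB b)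
        || (!decide (rankB b < rankB a) && decide (a < b)))
      = fun a b => decide (bKey a < bKey b) := funext fun a => funext fun b => before_eq a b
  rw [hb]

lemma contains_add (s : PySem.Set String) (x y : String) :
    PySem.Set.contains (PySem.Set.add s x) y = (PySem.Set.contains s y || y == x) := by
  by_cases hy : y ∈ s <;> by_cases hyx : y = x <;>
    simp [PySem.Set.add_eq_ite, hy, hyx, PySem.Set.contains] <;>
    split_ifs with hxs <;> simp_all

lemma filter_dedup_skip (t : List String) (seen : PySem.Set String) (x : String)
    (hc : PySem.Set.contains seen x = true) :
    (PySem.Set.ofList (x :: t)).filter (fun y => !PySem.Set.contains seen y)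
      = (PySem.Set.ofList t).filter (fun y => !PySem.Set.contains seen y) := by
  have hm : x ∈ seen := (PySem.Set.contains_iff seen x).mp hc
  rw [PySem.Set.ofList_cons, List.filter_cons_of_neg (by simp [hm]),
      show (PySem.Set.ofList t).discard x = (PySem.Set.ofList t).filter (fun y => !(y == x)) from rfl,
      List.filter_filter]
  apply List.filter_congr; intro y _
  cases hyx : (y == x)
  · simp
  · have hyx' : y = x := by simpa using hyx
    subst hyx'; simp [(PySem.Set.contains_iff seen y).mp hc]

lemma filter_dedup_add (t : List String) (seen : PySem.Set String) (x : String)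
    (hc : PySem.Set.contains seen x = false) :
    (PySem.Set.ofList (x :: t)).filter (fun y => !PySem.Set.contains seen y)
      = x :: (PySem.Set.ofList t).filter (fun y => !PySem.Set.contains (PySem.Set.add seen x) y) := by
  have hnm : x ∉ seen := by
    intro h; rw [(PySem.Set.contains_iff seen x).mpr h] at hc; simp at hc
  rw [PySem.Set.ofList_cons, List.filter_cons_of_pos (by simp [hnm]),
      show (PySem.Set.ofList t).discard x = (PySem.Set.ofList t).filter (fun y => !(y == x)) from rfl,
      List.filter_filter]
  congr 1
  apply List.filter_congr; intro y _
  rw [contains_add]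
  cases hyx : (y == x) <;> cases hys : PySem.Set.contains seen y <;> simp

lemma buckets_spec : ∀ (xs : List String) (seen : PySem.Set String) (buckets : List (List String)),
    buckets.length = 8 →
    (List.foldl bStep (seen, buckets) xs).2
      = (PySem.List.pyRange 0 8).map (fun r =>
          PySem.List.pyGetD buckets r []
            ++ ((PySem.Set.ofList xs).filter (fun y => !PySem.Set.contains seen y)).filter
                 (fun l => rankB l == r)) := by
  intro xs
  induction xs with
  | nil =>
    intro seen buckets h8
    have hlen : (8 : Int) = PySem.List.len buckets := by simp [PySem.List.len, h8]
    simp only [List.foldl_nil]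
    rw [hlen, show PySem.Set.ofList ([] : List String) = [] from rfl]
    simp only [List.filter_nil, List.append_nil]
    exact (PySem.List.map_pyGetD_pyRange_zero buckets []).symm
  | cons x t ih =>
    intro seen buckets h8
    rw [List.foldl_cons]
    by_cases hc : PySem.Set.contains seen x = true
    · have hstep : bStep (seen, buckets) x = (seen, buckets) := by
        simp only [bStep]; rw [if_pos hc]
      rw [hstep, ih seen buckets h8, filter_dedup_skip t seen x hc]
    · replace hc : PySem.Set.contains seen x = false := by simpa using hc
      have hnm : x ∉ seen := by
        intro h; rw [(PySem.Set.contains_iff seen x).mpr h] at hc; simp at hc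
      have hstep : bStep (seen, buckets) x
        = (PySem.Set.add seen x,
           PySem.List.pySetD buckets (rankB x)
             (PySem.List.pyGetD buckets (rankB x) [] ++ [x])) := by
        simp only [bStep]; rw [if_neg (by simp [hnm])]
      obtain ⟨hx0, hx8⟩ := rank_bounds x
      rw [hstep, ih _ _ (by rw [PySem.List.length_pySetD]; exact h8),
          filter_dedup_add t seen x hc]
      apply List.map_congr_left; intro r hr
      obtain ⟨hr0, hr8⟩ := PySem.List.mem_pyRange_one.mp hr
      rw [List.filter_cons]
      rw [PySem.List.pySetD_of_nonneg _ _ hx0,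
          PySem.List.pyGetD_eq_getElem _ _ hr0 (by simp [h8]; omega),
          List.getElem_set,
          PySem.List.pyGetD_eq_getElem buckets _ hr0 (by simp [h8]; omega)]
      by_cases hxr : rankB x = r
      · rw [if_pos (by omega), if_pos (by simp [hxr]), hxr, List.append_assoc,
            PySem.List.pyGetD_eq_getElem buckets _ hr0 (by simp [h8]; omega)]
        simp
      · rw [if_neg (by omega), if_neg (by simp [hxr])]

lemma pyGetD_allnil (l : List (List String)) (r : Int) (h : ∀ a ∈ l, a = []) :
    PySem.List.pyGetD l r [] = [] := by
  by_cases hin : PySem.Raise.InRange l.length r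
  · exact h _ (PySem.List.pyGetD_mem l [] hin)
  · exact PySem.List.pyGetD_of_none l r [] ((PySem.List.pyGet?_eq_none_iff l r).mpr hin)

lemma perm_buckets : ∀ (n : Nat) (ys : List String), (∀ l ∈ ys, rankB l < (n : Int)) →
    ((PySem.List.pyRange 0 (n : Int)).flatMap (fun r => ys.filter (fun l => rankB l == r))).Perm ys := by
  intro n
  induction n with
  | zero =>
    intro ys h
    cases ys with
    | nil => simp [PySem.List.pyRange_one_eq_nil]
    | cons a t =>
      exact absurd (h a (List.mem_cons_self)) (by have := (rank_bounds a).1; push_cast; omega)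
  | succ n ih =>
    intro ys h
    have hcast : ((n + 1 : Nat) : Int) = (n : Int) + 1 := by push_cast; ring
    rw [hcast, PySem.List.pyRange_one_succ_right (by positivity), List.flatMap_append,
        List.flatMap_cons, List.flatMap_nil, List.append_nil]
    have hfil : ∀ r ∈ PySem.List.pyRange 0 (n : Int),
        ys.filter (fun l => rankB l == r)
          = (ys.filter (fun l => decide (rankB l < (n : Int)))).filter (fun l => rankB l == r) := by
      intro r hr
      obtain ⟨hr0, hrn⟩ := PySem.List.mem_pyRange_one.mp hr
      rw [List.filter_filter]
      apply List.filter_congr; intro l _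
      cases hbeq : (rankB l == r)
      · simp
      · have : rankB l = r := by simpa using hbeq
        simp [this, hrn]
    have h1 : ((PySem.List.pyRange 0 (n : Int)).flatMap
        (fun r => ys.filter (fun l => rankB l == r))).Perm
          (ys.filter (fun l => decide (rankB l < (n : Int)))) := by
      rw [List.flatMap_def, List.map_congr_left (fun r hr => by rw [hfil r hr]), ← List.flatMap_def]
      exact ih _ (fun l hl => by simpa using (List.mem_filter.mp hl).2)
    have h2 : ys.filter (fun l => rankB l == (n : Int))
        = ys.filter (fun l => !decide (rankB l < (n : Int))) := by
      apply List.filter_congr; intro l hl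
      have hb := (rank_bounds l).1
      have hn := h l hl
      cases hbeq : (rankB l == (n : Int))
      · have : rankB l ≠ (n : Int) := by simpa using hbeq
        simp only [hcast] at hn
        have : rankB l < (n : Int) := by omega
        simp [this]
      · have : rankB l = (n : Int) := by simpa using hbeq
        simp [this]
    have h3 : ((PySem.List.pyRange 0 (n : Int)).flatMap (fun r => ys.filter (fun l => rankB l == r))
            ++ ys.filter (fun l => rankB l == (n : Int))).Perm
          (ys.filter (fun l => decide (rankB l < (n : Int)))
            ++ ys.filter (fun l => !decide (rankB l < (n : Int)))) := by
      rw [h2]; exact h1.append_right _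
    exact h3.trans (List.filter_append_perm _ ys)

lemma grand (D : List String) (hnd : D.Nodup) :
    PySem.List.sorted D bKey false
      = ((PySem.List.pyRange 0 8).map (fun r =>
          PySem.List.sorted (D.filter (fun l => rankB l == r)) (fun x => x) false)).flatten := by
  apply PySem.List.sorted_eq_of_perm_of_pairwise_lt
  · rw [← List.flatMap_def]
    have hch : ∀ r ∈ PySem.List.pyRange 0 (8 : Int),
        (PySem.List.sorted (D.filter (fun l => rankB l == r)) (fun x => x) false).Perm
          (D.filter (fun l => rankB l == r)) :=
      fun r _ => PySem.List.sorted_perm _ _ _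
    refine (List.Perm.flatMap_left _ hch).trans ?_
    have h8 : ((8 : Nat) : Int) = (8 : Int) := by norm_num
    have := perm_buckets 8 D (fun l hl => by rw [h8]; exact (rank_bounds l).2)
    rw [h8] at this
    exact this
  · rw [List.pairwise_flatten]
    constructor
    · intro c hc
      obtain ⟨r, hr, rfl⟩ := List.mem_map.mp hc
      have hle := PySem.List.sorted_pairwise (D.filter (fun l => rankB l == r)) (fun x => x)
      have hnd' : (PySem.List.sorted (D.filter (fun l => rankB l == r)) (fun x => x) false).Nodup :=
        (PySem.List.sorted_perm _ _ _).symm.nodup (hnd.filter _)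
      refine (hle.and hnd').imp_of_mem ?_
      intro a b ha hb hab
      have hra : rankB a = r := by
        have := (List.mem_filter.mp ((PySem.List.mem_sorted _ _ _ a).mp ha)).2; simpa using this
      have hrb : rankB b = r := by
        have := (List.mem_filter.mp ((PySem.List.mem_sorted _ _ _ b).mp hb)).2; simpa using this
      have hlt : a < b := lt_of_le_of_ne hab.1 hab.2
      unfold bKey
      rw [String.lt_iff_toList_lt, String.toList_ofList, String.toList_ofList]
      show (rcChar (rankB a) :: a.toList) < (rcChar (rankB b) :: b.toList)
      rw [List.cons_lt_cons_iff]
      exact Or.inr ⟨by rw [hra, hrb], String.lt_iff_toList_lt.mp hlt⟩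
    · rw [List.pairwise_map]
      refine (PySem.List.pairwise_lt_pyRange_one 0 8).imp_of_mem ?_
      intro r1 r2 hr1 hr2 hlt x hx y hy
      obtain ⟨h10, h18⟩ := PySem.List.mem_pyRange_one.mp hr1
      obtain ⟨h20, h28⟩ := PySem.List.mem_pyRange_one.mp hr2
      have hrx : rankB x = r1 := by
        have := (List.mem_filter.mp ((PySem.List.mem_sorted _ _ _ x).mp hx)).2; simpa using this
      have hry : rankB y = r2 := by
        have := (List.mem_filter.mp ((PySem.List.mem_sorted _ _ _ y).mp hy)).2; simpa using this
      unfold bKey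
      rw [String.lt_iff_toList_lt, String.toList_ofList, String.toList_ofList]
      show (rcChar (rankB x) :: x.toList) < (rcChar (rankB y) :: y.toList)
      rw [List.cons_lt_cons_iff]
      exact Or.inl (by rw [hrx, hry]; exact (rc_lt_iff h10 h18 h20 h28).mpr hlt)

-- ===== VERDICT (by name: the statement is the Claim_ definition above) =====
theorem select_key_internal_links_py_spec : Claim_equal_select_key_internal_links_py := by
  intro links mp _hdom
  unfold Spec_select_key_internal_links_py
  unfold select_key_internal_links_py select_key_internal_links_py_alt
  dsimp only
  -- A side: the quadratic dedup is set(…) insertion, and the global tuple sort is the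
  -- bKey sort, which equals the concatenation of the per-rank sorted buckets
  rw [dedupA links [], PySem.Set.update_nil_left, sorted2_eq_sorted,
      grand (PySem.Set.ofList links) (PySem.Set.nodup_ofList links)]
  -- B side: name the fold body, compute the final buckets
  have hb : (fun (st : PySem.Set String × List (List String)) link =>
      if PySem.Set.contains st.1 link then st
      else (PySem.Set.add st.1 link,
            PySem.List.pySetD st.2 (rankB link)
              (PySem.List.pyGetD st.2 (rankB link) [] ++ [link]))) = bStep := rfl
  rw [hb, buckets_spec links PySem.Set.empty _ (by simp [typeNames, kwTable])]
  have hseen : ∀ y : String, PySem.Set.contains (PySem.Set.empty : PySem.Set String) y = false :=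
    fun y => rfl
  simp only [hseen, Bool.not_false, List.filter_true]
  have hinit : ∀ r ∈ PySem.List.pyRange 0 (8 : Int),
      PySem.List.pyGetD (typeNames.map (fun _ => ([] : List String))) r []
        ++ ((PySem.Set.ofList links).filter (fun l => rankB l == r))
      = (PySem.Set.ofList links).filter (fun l => rankB l == r) := by
    intro r _
    rw [pyGetD_allnil _ r (by intro a ha; obtain ⟨_, -, h⟩ := List.mem_map.mp ha; exact h.symm)]
    simp
  rw [List.map_congr_left hinit]
  rw [PySem.List.foldl_append_eq_flatMap, List.nil_append, List.flatMap_def, List.map_map]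
  apply List.map_congr_left
  intro link _
  rw [classify_eq]
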